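-- pv_equiv track=rewrite | github.com/volcengine/verl | atropos/environments/intern_bootcamp/internbootcamp_lib/internbootcamp/bootcamp/egoodbyesouvenir/egoodbyesouvenir.py | compute_memory
-- ===== SOURCE A (Python) =====
-- def compute_memory(a, l, r):
--     positions = {}
--     for i in range(l-1, r):
--         x = a[i]
--         if x not in positions:
--             positions[x] = {'first': i+1, 'last': i+1}
--         else:
--             if i+1 < positions[x]['first']:
--                 positions[x]['first'] = i+1
--             if i+1 > positions[x]['last']:
--                 positions[x]['last'] = i+1
--     total = 0
--     for x in positions:
--         total += positions[x]['last'] - positions[x]['first']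
--     return total
-- ===== SOURCE B (Python) =====
-- def compute_memory(a, l, r):
--     # Telescoping: last - first = sum of gaps between consecutive occurrences,
--     # so accumulate (current position - previous occurrence) directly.
--     prev = {}
--     ans = 0
--     for i in range(l - 1, r):
--         x = a[i]
--         if x in prev:
--             ans += (i + 1) - prev[x]
--         prev[x] = i + 1
--     return ans
-- ===== Notes on version B (the rewrite author's own statement) =====
-- stated objective: simpler
-- what changed: Replaces A's per-value {'first','last'} record dict plus a final per-value subtraction loop with a telescoping-sum algorithm: since last-first equals the sum of gaps between consecutive occurrences of a value, B keeps only a value->previous-position dict and adds each gap (i+1)-prev[x] to the answer as it scans, with no first/last bookkeeping and no post-loop aggregation.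
import Mathlib
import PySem

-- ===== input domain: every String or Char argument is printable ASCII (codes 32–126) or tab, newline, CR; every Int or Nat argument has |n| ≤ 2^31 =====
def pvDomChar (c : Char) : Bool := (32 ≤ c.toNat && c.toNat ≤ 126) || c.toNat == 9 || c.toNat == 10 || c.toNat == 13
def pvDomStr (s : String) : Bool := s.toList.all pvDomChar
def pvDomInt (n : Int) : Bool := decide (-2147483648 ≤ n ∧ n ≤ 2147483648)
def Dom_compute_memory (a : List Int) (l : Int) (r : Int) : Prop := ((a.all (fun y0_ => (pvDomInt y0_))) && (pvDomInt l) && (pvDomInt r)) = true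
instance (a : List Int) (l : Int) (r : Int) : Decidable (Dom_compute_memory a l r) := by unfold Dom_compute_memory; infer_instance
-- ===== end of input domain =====

-- B replaces A's per-value {'first','last'} record dict and final subtraction loop with a
-- telescoping-sum algorithm: last-first = sum of consecutive-occurrence gaps, accumulated in one running answer.


-- ===== PORT A =====
-- loop body of A: x = a[i]; the inner dict {'first': f, 'last': t} is ported as the pair (f, t)
def stepA (a : List Int) (d : PySem.Dict Int (Int × Int)) (i : Int) : PySem.Dict Int (Int × Int) :=
  match PySem.List.pyGet? a i with
  | none => d            -- IndexError: excluded by Pre_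
  | some x =>
    match d.get? x with
    | none => d.insert x (i + 1, i + 1)
    | some p =>
      let p1 := if i + 1 < p.1 then (i + 1, p.2) else p
      let p2 := if i + 1 > p1.2 then (p1.1, i + 1) else p1
      d.insert x p2

def compute_memory (a : List Int) (l : Int) (r : Int) : Int :=
  let positions := (PySem.List.pyRange (l - 1) r 1).foldl (stepA a) PySem.Dict.empty
  positions.items.foldl (fun total p => total + (p.2.2 - p.2.1)) 0

-- ===== PORT B =====
-- loop body of B over the state (prev, ans)
def stepB (a : List Int) (st : PySem.Dict Int Int × Int) (i : Int) : PySem.Dict Int Int × Int :=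
  match PySem.List.pyGet? a i with
  | none => st           -- IndexError: excluded by Pre_
  | some x =>
    let ans := match st.1.get? x with
      | some p => st.2 + ((i + 1) - p)
      | none => st.2
    (st.1.insert x (i + 1), ans)

def compute_memory_alt (a : List Int) (l : Int) (r : Int) : Int :=
  ((PySem.List.pyRange (l - 1) r 1).foldl (stepB a) (PySem.Dict.empty, 0)).2

-- ===== PRECONDITION & SPEC =====
-- Exactly the inputs where Python A returns: either the range is empty, or every index
-- i ∈ [l-1, r) is a valid (possibly negative) Python index into a.
def Pre_compute_memory (a : List Int) (l : Int) (r : Int) : Prop :=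
  r ≤ l - 1 ∨ (-(a.length : Int) ≤ l - 1 ∧ r ≤ (a.length : Int))
instance (a : List Int) (l : Int) (r : Int) : Decidable (Pre_compute_memory a l r) := by unfold Pre_compute_memory; infer_instance
def pvWitness_compute_memory : List Int × Int × Int := ([1, 2, 1, 3], 1, 4)

def Spec_compute_memory (a : List Int) (l : Int) (r : Int) (out : Int) : Prop := out = compute_memory_alt a l r
instance (a : List Int) (l : Int) (r : Int) (out : Int) : Decidable (Spec_compute_memory a l r out) := by unfold Spec_compute_memory; infer_instance

-- ===== CLAIM (what is proved, stated in full; the proofs are below) =====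
def Claim_equal_compute_memory : Prop := ∀ (a : List Int) (l : Int) (r : Int), Dom_compute_memory a l r → Pre_compute_memory a l r → Spec_compute_memory a l r (compute_memory a l r)

-- ===== LEMMAS AND PROOFS =====

-- replacing the unique entry with key x changes the (last-first)-sum by the entry's delta
lemma sum_update (x : Int) (v p : Int × Int) :
    ∀ xs : List (Int × Int × Int), (x, p) ∈ xs → (xs.map Prod.fst).Nodup →
    ((xs.map (fun q => if q.1 == x then (x, v) else q)).map (fun q => q.2.2 - q.2.1)).sum
      = (xs.map (fun q => q.2.2 - q.2.1)).sum + ((v.2 - v.1) - (p.2 - p.1)) := by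
  intro xs
  induction xs with
  | nil => intro hmem; simp at hmem
  | cons y ys ih =>
    intro hmem hnd
    simp only [List.map_cons, List.nodup_cons] at hnd
    obtain ⟨hny, hnd'⟩ := hnd
    by_cases hy : y.1 = x
    · have hyp : y = (x, p) := by
        rcases List.mem_cons.mp hmem with h | h
        · exact h.symm
        · exact absurd (List.mem_map.mpr ⟨(x, p), h, rfl⟩) (hy ▸ hny)
      subst hyp
      have htail : ys.map (fun q => if q.1 == x then (x, v) else q) = ys := by
        refine List.map_congr_left ?_ |>.trans (List.map_id ys)
        intro q hq
        have : q.1 ≠ x := fun hqx => hny (List.mem_map.mpr ⟨q, hq, hqx⟩)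
        simp [this]
      rw [List.map_cons, if_pos (by simp : (((x, p).1 : Int) == x) = true), htail,
          List.map_cons, List.sum_cons, List.map_cons, List.sum_cons]
      ring
    · have hmem' : (x, p) ∈ ys := by
        rcases List.mem_cons.mp hmem with h | h
        · exact absurd (congrArg Prod.fst h.symm) hy
        · exact h
      rw [List.map_cons, if_neg (by simpa using hy), List.map_cons, List.sum_cons,
          List.map_cons, List.sum_cons, ih hmem' hnd']
      ring

-- invariant tying A's record dict to B's (prev, ans) state; b bounds all stored positions
def StInv (b : Int) (d : PySem.Dict Int (Int × Int)) (st : PySem.Dict Int Int × Int) : Prop :=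
  st.1.items = d.items.map (fun p => (p.1, p.2.2)) ∧
  st.2 = (d.items.map (fun p => p.2.2 - p.2.1)).sum ∧
  d.keys.Nodup ∧
  ∀ p ∈ d.items, p.2.1 ≤ b ∧ p.2.2 ≤ b

lemma inv_step (a : List Int) (b i : Int) (hbi : b ≤ i)
    (d : PySem.Dict Int (Int × Int)) (st : PySem.Dict Int Int × Int)
    (h : StInv b d st) : StInv (i + 1) (stepA a d i) (stepB a st i) := by
  obtain ⟨h1, h2, h3, h4⟩ := h
  have hkeq : st.1.keys = d.keys := by
    simp only [PySem.Dict.keys, h1, List.map_map]; rfl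
  have hnodup1 : st.1.keys.Nodup := by rw [hkeq]; exact h3
  cases hx : PySem.List.pyGet? a i with
  | none =>
    have hA : stepA a d i = d := by simp [stepA, hx]
    have hB : stepB a st i = st := by simp [stepB, hx]
    rw [hA, hB]
    exact ⟨h1, h2, h3, fun p hp => ⟨by linarith [(h4 p hp).1], by linarith [(h4 p hp).2]⟩⟩
  | some x =>
    cases hg : d.get? x with
    | none =>
      have hc : d.contains x = false := (PySem.Dict.get?_eq_none_iff_contains d x).mp hg
      have hnm : x ∉ d.keys := (PySem.Dict.get?_eq_none_iff_not_mem_keys d x).mp hg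
      have hg' : st.1.get? x = none := by
        rw [PySem.Dict.get?_eq_none_iff_not_mem_keys, hkeq]; exact hnm
      have hlc : st.1.contains x = false := (PySem.Dict.get?_eq_none_iff_contains st.1 x).mp hg'
      have hA : stepA a d i = d.insert x (i + 1, i + 1) := by simp [stepA, hx, hg]
      have hB : stepB a st i = (st.1.insert x (i + 1), st.2) := by
        simp [stepB, hx, hg']
      rw [hA, hB]
      refine ⟨?_, ?_, ?_, ?_⟩
      · rw [PySem.Dict.items_insert_of_not_contains st.1 _ hlc,
            PySem.Dict.items_insert_of_not_contains d _ hc, List.map_append, h1]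
        rfl
      · rw [PySem.Dict.items_insert_of_not_contains d _ hc, List.map_append, List.sum_append, h2]
        simp
      · exact PySem.Dict.nodup_keys_insert d x _ h3
      · intro p hp
        rw [PySem.Dict.items_insert_of_not_contains d _ hc] at hp
        rcases List.mem_append.mp hp with hp | hp
        · exact ⟨by linarith [(h4 p hp).1], by linarith [(h4 p hp).2]⟩
        · simp at hp; subst hp; simp
    | some p =>
      have hmem : (x, p) ∈ d.items := PySem.Dict.mem_items_of_get?_eq_some d hg
      have hpb : p.1 ≤ b ∧ p.2 ≤ b := h4 _ hmem
      have hc : d.contains x = true := by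
        rw [PySem.Dict.contains_eq_isSome_get?, hg]; rfl
      have hmem' : (x, p.2) ∈ st.1.items := by
        rw [h1]; exact List.mem_map.mpr ⟨(x, p), hmem, rfl⟩
      have hg' : st.1.get? x = some p.2 :=
        (PySem.Dict.get?_eq_some_iff_mem_items st.1 x p.2 hnodup1).mpr hmem'
      have hlc : st.1.contains x = true := by
        rw [PySem.Dict.contains_eq_isSome_get?, hg']; rfl
      -- A's two branch tests resolve: i+1 < first is false, i+1 > last is true
      have hA : stepA a d i = d.insert x (p.1, i + 1) := by
        simp only [stepA, hx, hg]
        rw [if_neg (show ¬ i + 1 < p.1 by omega)]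
        rw [if_pos (show i + 1 > p.2 by omega)]
      have hB : stepB a st i = (st.1.insert x (i + 1), st.2 + ((i + 1) - p.2)) := by
        simp [stepB, hx, hg']
      -- a key-x entry of d.items IS (x, p)
      have huniq : ∀ q ∈ d.items, q.1 = x → q = (x, p) := by
        intro q hq hqx
        have hq2 : d.get? q.1 = some q.2 := by
          rw [(PySem.Dict.get?_eq_some_iff_mem_items d q.1 q.2 h3)]; exact hq
        rw [hqx, hg] at hq2
        cases q; simp at hqx hq2 ⊢; exact ⟨hqx, hq2.symm⟩
      rw [hA, hB]
      refine ⟨?_, ?_, ?_, ?_⟩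
      · rw [PySem.Dict.items_insert_of_contains st.1 _ hlc,
            PySem.Dict.items_insert_of_contains d _ hc, h1, List.map_map, List.map_map]
        refine List.map_congr_left ?_
        intro q hq
        by_cases hqx : q.1 = x <;> simp [Function.comp, hqx]
      · rw [PySem.Dict.items_insert_of_contains d _ hc]
        have hnd : (d.items.map Prod.fst).Nodup := by
          simpa [PySem.Dict.keys] using h3
        rw [sum_update x (p.1, i + 1) p d.items hmem hnd, ← h2]
        ring
      · exact PySem.Dict.nodup_keys_insert d x _ h3
      · rw [PySem.Dict.items_insert_of_contains d _ hc]
        intro q hq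
        rcases List.mem_map.mp hq with ⟨q0, hq0, hq0e⟩
        by_cases hqx : q0.1 = x
        · rw [if_pos (by simp [hqx])] at hq0e
          subst hq0e
          exact ⟨by simp; omega, by simp⟩
        · rw [if_neg (by simp [hqx])] at hq0e
          subst hq0e
          exact ⟨by linarith [(h4 q0 hq0).1], by linarith [(h4 q0 hq0).2]⟩

lemma inv_fold (a : List Int) (I : List Int) :
    ∀ (b : Int) (d : PySem.Dict Int (Int × Int)) (st : PySem.Dict Int Int × Int),
    I.Pairwise (· < ·) → (∀ i ∈ I, b ≤ i) → StInv b d st →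
    ∃ b', StInv b' (I.foldl (stepA a) d) (I.foldl (stepB a) st) := by
  induction I with
  | nil => exact fun b d st _ _ h => ⟨b, h⟩
  | cons i I ih =>
    intro b d st hpw hge h
    rcases List.pairwise_cons.mp hpw with ⟨hlt, hpw'⟩
    exact ih (i + 1) _ _ hpw' (fun j hj => Int.add_one_le_iff.mpr (hlt j hj))
      (inv_step a b i (hge i (List.mem_cons_self ..)) d st h)

-- ===== VERDICT (by name: the statement is the Claim_ definition above) =====
theorem compute_memory_spec : Claim_equal_compute_memory := by
  intro a l r _ _
  unfold Spec_compute_memory compute_memory compute_memory_alt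
  obtain ⟨b', -, h2, -, -⟩ := inv_fold a (PySem.List.pyRange (l - 1) r 1) (l - 1)
    PySem.Dict.empty (PySem.Dict.empty, 0)
    (PySem.List.pairwise_lt_pyRange_one (l - 1) r)
    (fun i hi => (PySem.List.mem_pyRange_one.mp hi).1)
    (by refine ⟨rfl, rfl, ?_, ?_⟩ <;> simp [PySem.Dict.empty, PySem.Dict.keys])
  rw [PySem.List.foldl_add]
  simpa using h2.symm
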